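-- pv_equiv track=rewrite | github.com/Junroot/Algorithm | programmers/72412.py | count_satisfied_grades
-- ===== SOURCE A (Python) =====
-- def count_satisfied_grades(grades, min_grade):
--     start = 0
--     end = len(grades)
--     while start < end:
--         mid = (start + end) // 2
--         if grades[mid] < min_grade:
--             start = mid + 1
--         else:
--             end = mid
--     return len(grades) - end
-- ===== SOURCE B (Python) =====
-- def count_satisfied_grades(grades, min_grade):
--     # Recursion on (offset, window length): probe off + n//2, keep the half
--     # that A's window search would keep; the subtraction is folded into the
--     # base case, which returns the final count directly.
--     def go(off, n):
--         if n == 0: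
--             return len(grades) - off
--         half = n // 2
--         if grades[off + half] < min_grade:
--             return go(off + half + 1, n - half - 1)
--         return go(off, half)
--     return go(0, len(grades))
-- ===== Notes on version B (the rewrite author's own statement) =====
-- stated objective: alternative
-- what changed: A's imperative while-loop over a (start,end) index pair is replaced by a recursion over an (offset, window-length) pair whose base case returns the count directly (len - offset); it probes the identical positions off + n//2 = (start+end)//2, so it agrees on every list, sorted or not.
import Mathlib
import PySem

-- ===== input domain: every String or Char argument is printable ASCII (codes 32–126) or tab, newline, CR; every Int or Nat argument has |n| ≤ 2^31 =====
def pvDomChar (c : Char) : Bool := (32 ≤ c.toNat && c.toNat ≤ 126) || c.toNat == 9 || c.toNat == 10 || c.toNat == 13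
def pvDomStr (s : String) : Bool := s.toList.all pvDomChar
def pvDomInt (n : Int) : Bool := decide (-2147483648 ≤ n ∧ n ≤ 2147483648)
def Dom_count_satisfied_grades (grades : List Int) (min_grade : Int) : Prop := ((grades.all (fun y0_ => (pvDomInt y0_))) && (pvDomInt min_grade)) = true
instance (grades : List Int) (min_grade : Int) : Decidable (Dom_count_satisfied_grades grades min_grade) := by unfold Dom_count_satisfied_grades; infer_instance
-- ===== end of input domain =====

-- B replaces A's (start,end) while-loop by a recursion on (offset, window length) whose base case yields the count directly; same probe positions, different decomposition.
-- ===== PORT A =====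
-- A's while-loop over the state (start, end); terminates because end - start shrinks.
def csgLoop (grades : List Int) (min_grade : Int) (start stop : Nat) : Nat :=
  if h : start < stop then
    let mid := (start + stop) / 2
    if grades.getD mid 0 < min_grade then
      csgLoop grades min_grade (mid + 1) stop
    else
      csgLoop grades min_grade start mid
  else stop
termination_by stop - start
decreasing_by
  · omega
  · have : (start + stop) / 2 < stop := by omega
    omega

-- grades[mid] is always in range in A's loop (start < stop ≤ len), so getD is exact there.
def count_satisfied_grades (grades : List Int) (min_grade : Int) : Int :=
  (grades.length : Int) - (csgLoop grades min_grade 0 grades.length : Int)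

-- ===== PORT B =====
-- B's helper go(off, n): count of satisfied elements, probing position off + n/2 of the current window.
def csgGo (grades : List Int) (min_grade : Int) (off n : Nat) : Int :=
  if n = 0 then (grades.length : Int) - (off : Int)
  else
    let half := n / 2
    if grades.getD (off + half) 0 < min_grade then
      csgGo grades min_grade (off + half + 1) (n - half - 1)
    else
      csgGo grades min_grade off half
termination_by n
decreasing_by
  · omega
  · omega

def count_satisfied_grades_alt (grades : List Int) (min_grade : Int) : Int :=
  csgGo grades min_grade 0 grades.length

-- ===== PRECONDITION & SPEC =====
def Spec_count_satisfied_grades (grades : List Int) (min_grade : Int) (out : Int) : Prop := out = count_satisfied_grades_alt grades min_grade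
instance (grades : List Int) (min_grade : Int) (out : Int) : Decidable (Spec_count_satisfied_grades grades min_grade out) := by unfold Spec_count_satisfied_grades; infer_instance

-- ===== CLAIM (what is proved, stated in full; the proofs are below) =====
def Claim_equal_count_satisfied_grades : Prop := ∀ (grades : List Int) (min_grade : Int), Dom_count_satisfied_grades grades min_grade → Spec_count_satisfied_grades grades min_grade (count_satisfied_grades grades min_grade)

-- ===== LEMMAS AND PROOFS =====
-- With off = start and n = stop - start, B probes off + n/2 = (start+stop)/2: the very position A probes.
theorem csgGo_eq_loop (grades : List Int) (min_grade : Int) :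
    ∀ (n lo : Nat), csgGo grades min_grade lo n
      = (grades.length : Int) - (csgLoop grades min_grade lo (lo + n) : Int) := by
  intro n
  induction n using Nat.strong_induction_on with
  | _ n ih =>
    intro lo
    rw [csgGo, csgLoop]
    by_cases h0 : n = 0
    · subst h0; simp
    · have hlt : lo < lo + n := by omega
      have hmid : (lo + (lo + n)) / 2 = lo + n / 2 := by omega
      simp only [h0, if_neg, hlt, dif_pos, hmid, not_false_iff]
      by_cases hc : grades.getD (lo + n / 2) 0 < min_grade
      · simp only [hc, if_pos]
        have harg : lo + n / 2 + 1 + (n - n / 2 - 1) = lo + n := by omega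
        have := ih (n - n / 2 - 1) (by omega) (lo + n / 2 + 1)
        rw [this, harg]
      · simp only [hc, if_neg, not_false_iff]
        exact ih (n / 2) (by omega) lo

-- ===== VERDICT (by name: the statement is the Claim_ definition above) =====
theorem count_satisfied_grades_spec : Claim_equal_count_satisfied_grades := by
  intro grades min_grade _
  unfold Spec_count_satisfied_grades count_satisfied_grades count_satisfied_grades_alt
  rw [csgGo_eq_loop grades min_grade grades.length 0, Nat.zero_add]
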